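-- pv_equiv track=rewrite | github.com/poha-dev/MM-TRPG-Translator | translator.py | _tsv_to_table
-- ===== SOURCE A (Python) =====
-- def _tsv_to_table(tsv_text, original_rows, original_cols):
--     """Parses TSV text back to a 2D list. Pads/trims to match original dimensions."""
--     result = []
--     for line in tsv_text.strip().split("\n"):
--         cells = line.split("\t")
--         # Ensure correct column count
--         while len(cells) < original_cols:
--             cells.append("")
--         result.append(cells[:original_cols])
--     # Ensure correct row count
--     while len(result) < original_rows:
--         result.append([""] * original_cols)
--     return result[:original_rows]
-- ===== SOURCE B (Python) =====
-- def _tsv_to_table(tsv_text, original_rows, original_cols):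
--     """Single-pass character scanner: walks the stripped text once, cutting cells
--     on tabs and rows on newlines (no str.split at all), then reads the parsed
--     grid back through the target dimensions."""
--     rows, row, cell = [], [], []
--     for ch in tsv_text.strip():
--         if ch == "\t":
--             row.append("".join(cell))
--             cell = []
--         elif ch == "\n":
--             row.append("".join(cell))
--             rows.append(row)
--             row, cell = [], []
--         else:
--             cell.append(ch)
--     row.append("".join(cell))
--     rows.append(row)
--     return [[rows[r][c] if r < len(rows) and c < len(rows[r]) else ""
--              for c in range(original_cols)]
--             for r in range(original_rows)]
-- ===== Notes on version B (the rewrite author's own statement) =====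
-- stated objective: alternative
-- what changed: B replaces A's split/split/pad/trim pipeline with a single-pass character scanner (tab cuts a cell, newline cuts a row) and then reads the parsed grid back through the target dimensions, so str.split and the padding while-loops disappear.
-- outside the precondition, e.g. on _tsv_to_table('a\tb\nc', -1, 2): A returns [['a', 'b']], B returns []; on _tsv_to_table('a\tb', 1, -1): A returns [['a']], B returns [[]]
import Mathlib
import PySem

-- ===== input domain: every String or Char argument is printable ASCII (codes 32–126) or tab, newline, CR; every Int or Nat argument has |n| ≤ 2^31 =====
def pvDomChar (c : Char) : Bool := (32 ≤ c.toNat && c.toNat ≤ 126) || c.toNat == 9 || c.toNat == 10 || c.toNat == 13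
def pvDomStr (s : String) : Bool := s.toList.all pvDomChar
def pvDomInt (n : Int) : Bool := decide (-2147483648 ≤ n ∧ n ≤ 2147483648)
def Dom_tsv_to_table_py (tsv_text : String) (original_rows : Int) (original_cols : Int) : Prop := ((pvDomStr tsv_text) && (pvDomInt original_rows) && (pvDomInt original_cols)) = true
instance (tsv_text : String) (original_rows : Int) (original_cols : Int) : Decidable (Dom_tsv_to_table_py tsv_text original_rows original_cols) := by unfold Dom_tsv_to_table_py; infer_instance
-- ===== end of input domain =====

-- B replaces A's split/pad/trim pipeline with a single-pass character scanner (tab cuts a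
-- cell, newline cuts a row) plus a read-back over the target dimensions (objective: alternative).


-- ===== PORT A =====
-- s.split(sep) for a nonempty literal separator (split? is none only for sep = "")
def pvSplit (s sep : String) : List String := (PySem.Str.split? s sep).getD []

-- 'while len(cells) < original_cols: cells.append("")'
def pvPadCells (C : Int) (cells : List String) : List String :=
  if (cells.length : Int) < C then pvPadCells C (cells ++ [""]) else cells
termination_by (C - cells.length).toNat
decreasing_by simp only [List.length_append, List.length_cons, List.length_nil]; omega

-- 'while len(result) < original_rows: result.append([""] * original_cols)'
def pvPadRows (R : Int) (C : Int) (res : List (List String)) : List (List String) :=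
  if (res.length : Int) < R then pvPadRows R C (res ++ [List.replicate C.toNat ""]) else res
termination_by (R - res.length).toNat
decreasing_by simp only [List.length_append, List.length_cons, List.length_nil]; omega

def tsv_to_table_py (tsv_text : String) (original_rows : Int) (original_cols : Int) : List (List String) :=
  let lines := pvSplit (PySem.Str.strip tsv_text) "\n"
  let result := lines.foldl (fun acc line =>
    let cells := pvSplit line "\t"
    acc ++ [PySem.List.slice (pvPadCells original_cols cells) none (some original_cols)]) []
  let result := pvPadRows original_rows original_cols result
  PySem.List.slice result none (some original_rows)

-- ===== PORT B =====
-- the loop body of Source B's scanner: state = (rows, row, cell); ''.join(cell) over a list of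
-- single chars is exactly String.ofList cell
def pvScanStep (st : List (List String) × List String × List Char) (ch : Char) :
    List (List String) × List String × List Char :=
  if ch = '\t' then (st.1, st.2.1 ++ [String.ofList st.2.2], [])
  else if ch = '\n' then (st.1 ++ [st.2.1 ++ [String.ofList st.2.2]], [], [])
  else (st.1, st.2.1, st.2.2 ++ [ch])

def tsv_to_table_py_alt (tsv_text : String) (original_rows : Int) (original_cols : Int) : List (List String) :=
  let st := (PySem.Str.strip tsv_text).toList.foldl pvScanStep ([], [], [])
  let rows := st.1 ++ [st.2.1 ++ [String.ofList st.2.2]]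
  (PySem.List.pyRange 0 original_rows 1).map (fun r =>
    (PySem.List.pyRange 0 original_cols 1).map (fun c =>
      if r < (rows.length : Int) ∧ c < ((PySem.List.pyGetD rows r []).length : Int)
      then PySem.List.pyGetD (PySem.List.pyGetD rows r []) c "" else ""))

-- ===== PRECONDITION & SPEC =====
-- Pre_ restricts to the natural domain of non-negative dimensions: A also accepts negative
-- original_rows/original_cols, where its slices trim from the end — an artefact of Python's
-- negative-slice semantics that B's range-driven construction naturally does not reproduce.
def Pre_tsv_to_table_py (tsv_text : String) (original_rows : Int) (original_cols : Int) : Prop :=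
  0 ≤ original_rows ∧ 0 ≤ original_cols
instance (tsv_text : String) (original_rows : Int) (original_cols : Int) : Decidable (Pre_tsv_to_table_py tsv_text original_rows original_cols) := by unfold Pre_tsv_to_table_py; infer_instance

def pvWitness_tsv_to_table_py : String × Int × Int := ("a\tb\nc", 3, 2)

def Spec_tsv_to_table_py (tsv_text : String) (original_rows : Int) (original_cols : Int) (out : List (List String)) : Prop := out = tsv_to_table_py_alt tsv_text original_rows original_cols
instance (tsv_text : String) (original_rows : Int) (original_cols : Int) (out : List (List String)) : Decidable (Spec_tsv_to_table_py tsv_text original_rows original_cols out) := by unfold Spec_tsv_to_table_py; infer_instance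

-- ===== CLAIM (what is proved, stated in full; the proofs are below) =====
def Claim_equal_tsv_to_table_py : Prop := ∀ (tsv_text : String) (original_rows : Int) (original_cols : Int), Dom_tsv_to_table_py tsv_text original_rows original_cols → Pre_tsv_to_table_py tsv_text original_rows original_cols → Spec_tsv_to_table_py tsv_text original_rows original_cols (tsv_to_table_py tsv_text original_rows original_cols)

-- ===== LEMMAS AND PROOFS =====

-- a reference single-character splitter, linking A's str.split and B's scanner
def splitC (ch : Char) : List Char → List (List Char)
  | [] => [[]]
  | c :: rest =>
    if c = ch then [] :: splitC ch rest
    else match splitC ch rest with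
      | [] => [[c]]
      | y :: ys => (c :: y) :: ys

theorem splitC_ne_nil (ch : Char) (l : List Char) : splitC ch l ≠ [] := by
  cases l with
  | nil => simp [splitC]
  | cons c rest =>
    simp only [splitC]
    split_ifs
    · simp
    · cases splitC ch rest <;> simp

def glueH (x : List Char) : List (List Char) → List (List Char)
  | [] => [x]
  | y :: ys => (x ++ y) :: ys

theorem go_single (fuel : Nat) (ch : Char) (l cur : List Char) (acc : List (List Char))
    (h : l.length < fuel) :
    PySem.Chars.splitOn.go [ch] fuel l cur acc = acc.reverse ++ glueH cur.reverse (splitC ch l) := by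
  induction fuel generalizing l cur acc with
  | zero => omega
  | succ f ih =>
    cases l with
    | nil =>
      simp [PySem.Chars.splitOn.go, splitC, glueH]
    | cons c rest =>
      rw [PySem.Chars.splitOn.go]
      by_cases hc : ch = c
      · subst hc
        have hp : List.isPrefixOf [ch] (ch :: rest) = true := by simp [List.isPrefixOf]
        simp only [hp, if_pos, List.length_cons, List.length_nil, List.drop_succ_cons, List.drop_zero]
        rw [ih rest [] (cur.reverse :: acc) (by simpa using Nat.lt_of_succ_lt_succ h)]
        simp only [splitC, if_pos rfl, glueH, List.reverse_cons, List.append_assoc,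
          List.reverse_nil, List.nil_append]
        rcases hs : splitC ch rest with _ | ⟨y, ys⟩
        · exact absurd hs (splitC_ne_nil ch rest)
        · simp [glueH]
      · have hp : List.isPrefixOf [ch] (c :: rest) = false := by
          simp [List.isPrefixOf]; intro hh; exact hc hh
        simp only [hp, Bool.false_eq_true, if_false]
        rw [ih rest (c :: cur) acc (by simpa using Nat.lt_of_succ_lt_succ h)]
        have hcc : c ≠ ch := fun hh => hc hh.symm
        simp only [splitC, if_neg hcc, List.reverse_cons]
        rcases hs : splitC ch rest with _ | ⟨y, ys⟩
        · exact absurd hs (splitC_ne_nil ch rest)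
        · simp [glueH]

theorem splitOn_single (ch : Char) (s : List Char) :
    PySem.Chars.splitOn s [ch] = splitC ch s := by
  unfold PySem.Chars.splitOn
  rw [go_single (s.length + 1) ch s [] [] (by omega)]
  rcases hs : splitC ch s with _ | ⟨y, ys⟩
  · exact absurd hs (splitC_ne_nil ch s)
  · simp [glueH]

theorem pvSplit_single (s sep : String) (ch : Char) (h : sep.toList = [ch]) :
    pvSplit s sep = (splitC ch s.toList).map String.ofList := by
  unfold pvSplit PySem.Str.split?
  rw [h]
  simp [PySem.Chars.split?, splitOn_single]

-- B's scanner produces exactly the split-split structure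
def glue2 (cell : List Char) : List String → List String
  | [] => [String.ofList cell]
  | s :: ss => (String.ofList cell ++ s) :: ss

def tabRow (l : List Char) : List String := (splitC '\t' l).map String.ofList

def glueR (row : List String) (cell : List Char) : List (List String) → List (List String)
  | [] => []
  | y :: ys => (row ++ glue2 cell y) :: ys

def pvFinish (st : List (List String) × List String × List Char) : List (List String) :=
  st.1 ++ [st.2.1 ++ [String.ofList st.2.2]]

theorem tabRow_ne_nil (l : List Char) : tabRow l ≠ [] := by
  unfold tabRow
  intro h
  exact splitC_ne_nil '\t' l (by simpa using h)

theorem glue2_nil (ts : List String) (h : ts ≠ []) : glue2 [] ts = ts := by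
  cases ts with
  | nil => exact absurd rfl h
  | cons s ss => simp [glue2, String.ofList_nil]

theorem scan_eq (cs : List Char) (rows : List (List String)) (row : List String) (cell : List Char) :
    pvFinish (cs.foldl pvScanStep (rows, row, cell))
      = rows ++ glueR row cell ((splitC '\n' cs).map tabRow) := by
  induction cs generalizing rows row cell with
  | nil =>
    simp [pvFinish, splitC, tabRow, glueR, glue2, String.ofList_nil, String.append_empty]
  | cons ch rest ih =>
    rw [List.foldl_cons]
    rcases hs : splitC '\n' rest with _ | ⟨y, ys⟩
    · exact absurd hs (splitC_ne_nil '\n' rest)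
    by_cases ht : ch = '\t'
    · subst ht
      have hstep : pvScanStep (rows, row, cell) '\t' = (rows, row ++ [String.ofList cell], []) := by
        simp [pvScanStep]
      rw [hstep, ih]
      have hsplit : splitC '\n' ('\t' :: rest) = ('\t' :: y) :: ys := by
        simp [splitC, hs]
      have hy : tabRow ('\t' :: y) = "" :: tabRow y := by
        simp [tabRow, splitC, String.ofList_nil]
      rw [hs, hsplit]
      simp only [List.map_cons, glueR, hy]
      rw [glue2_nil (tabRow y) (tabRow_ne_nil y)]
      simp [glue2, String.append_empty]
    · by_cases hn : ch = '\n'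
      · subst hn
        have hstep : pvScanStep (rows, row, cell) '\n' = (rows ++ [row ++ [String.ofList cell]], [], []) := by
          simp [pvScanStep]
        rw [hstep, ih]
        have hsplit : splitC '\n' ('\n' :: rest) = [] :: splitC '\n' rest := by
          simp [splitC]
        have h0 : tabRow ([] : List Char) = [""] := by
          simp [tabRow, splitC, String.ofList_nil]
        rw [hs, hsplit, hs]
        simp only [List.map_cons, glueR, h0]
        rw [glue2_nil (tabRow y) (tabRow_ne_nil y)]
        simp [glue2, String.append_empty]
      · have hstep : pvScanStep (rows, row, cell) ch = (rows, row, cell ++ [ch]) := by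
          simp [pvScanStep, ht, hn]
        rw [hstep, ih]
        have hsplit : splitC '\n' (ch :: rest) = (ch :: y) :: ys := by
          simp [splitC, hn, hs]
        rw [hs, hsplit]
        rcases hy : splitC '\t' y with _ | ⟨x, xs⟩
        · exact absurd hy (splitC_ne_nil '\t' y)
        have h1 : tabRow (ch :: y) = String.ofList (ch :: x) :: xs.map String.ofList := by
          simp [tabRow, splitC, ht, hy]
        have h2 : tabRow y = String.ofList x :: xs.map String.ofList := by
          simp [tabRow, hy]
        simp only [List.map_cons, glueR]
        rw [h1, h2]
        simp only [glue2]
        have h3 : String.ofList (cell ++ [ch]) ++ String.ofList x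
            = String.ofList cell ++ String.ofList (ch :: x) := by
          rw [← String.ofList_append, ← String.ofList_append]
          simp
        rw [h3]

-- the padding loops append exactly the missing empties
theorem pvPadCells_eq (C : Int) (cells : List String) :
    pvPadCells C cells = cells ++ List.replicate (C - cells.length).toNat "" := by
  fun_induction pvPadCells C cells with
  | case1 cells h ih =>
    rw [ih, List.append_assoc]
    congr 1
    have h1 : (C - (cells.length : Int)).toNat = ((C - ((cells ++ [""]).length : Int)).toNat) + 1 := by
      simp only [List.length_append, List.length_cons, List.length_nil]; omega
    rw [h1, List.replicate_succ]
    rfl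
  | case2 cells h =>
    have : (C - (cells.length : Int)).toNat = 0 := by omega
    simp [this]

theorem pvPadRows_eq (R C : Int) (res : List (List String)) :
    pvPadRows R C res = res ++ List.replicate (R - res.length).toNat (List.replicate C.toNat "") := by
  fun_induction pvPadRows R C res with
  | case1 res h ih =>
    rw [ih, List.append_assoc]
    congr 1
    have h1 : (R - (res.length : Int)).toNat = ((R - ((res ++ [List.replicate C.toNat ""]).length : Int)).toNat) + 1 := by
      simp only [List.length_append, List.length_cons, List.length_nil]; omega
    rw [h1, List.replicate_succ]
    rfl
  | case2 res h =>
    have : (R - (res.length : Int)).toNat = 0 := by omega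
    simp [this]

-- take n of (xs padded with d) is the n-indexed read-back with default d
theorem take_append_replicate_eq {α : Type} (xs : List α) (d : α) (n : Nat) :
    List.take n (xs ++ List.replicate (n - xs.length) d)
      = (List.range n).map (fun i => xs.getD i d) := by
  apply List.ext_getElem
  · simp; omega
  · intro i h1 h2
    simp only [List.getElem_take, List.getElem_map, List.getElem_range]
    rcases lt_or_ge i xs.length with hi | hi
    · rw [List.getElem_append_left hi]
      simp [List.getD, List.getElem?_eq_getElem hi]
    · rw [List.getElem_append_right hi]
      simp only [List.getElem_replicate]
      simp only [List.length_take, List.length_append, List.length_replicate] at h1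
      rw [List.getD_eq_default]
      omega

-- ===== VERDICT (by name: the statement is the Claim_ definition above) =====
theorem tsv_to_table_py_spec : Claim_equal_tsv_to_table_py := by
  intro t R C _ hPre
  obtain ⟨hR, hC⟩ := hPre
  unfold Spec_tsv_to_table_py tsv_to_table_py tsv_to_table_py_alt
  simp only [PySem.List.foldl_append_singleton_eq_map, List.nil_append]
  -- identify both parses with P := (splitC '\n' cs).map tabRow
  have hlines : pvSplit (PySem.Str.strip t) "\n"
      = (splitC '\n' (PySem.Str.strip t).toList).map String.ofList :=
    pvSplit_single _ _ '\n' rfl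
  have hscan : pvFinish ((PySem.Str.strip t).toList.foldl pvScanStep ([], [], []))
      = (splitC '\n' (PySem.Str.strip t).toList).map tabRow := by
    rw [scan_eq]
    rcases hs : splitC '\n' (PySem.Str.strip t).toList with _ | ⟨y, ys⟩
    · exact absurd hs (splitC_ne_nil _ _)
    · simp only [List.map_cons, glueR, List.nil_append]
      rw [glue2_nil (tabRow y) (tabRow_ne_nil y)]
  generalize hcs : splitC '\n' (PySem.Str.strip t).toList = P0 at hlines hscan
  -- B's rows value
  show _ = (PySem.List.pyRange 0 R 1).map _
  rw [hlines]
  have hrows : (((PySem.Str.strip t).toList.foldl pvScanStep ([], [], [])).1 ++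
      [((PySem.Str.strip t).toList.foldl pvScanStep ([], [], [])).2.1 ++
        [String.ofList ((PySem.Str.strip t).toList.foldl pvScanStep ([], [], [])).2.2]])
      = P0.map tabRow := hscan
  rw [hrows]
  -- A's per-line cells: pvSplit (ofList y) "\t" = tabRow y
  have rowA : ∀ y : List Char,
      PySem.List.slice (pvPadCells C (pvSplit (String.ofList y) "\t")) none (some C)
        = (List.range C.toNat).map (fun i => (tabRow y).getD i "") := by
    intro y
    have hcells : pvSplit (String.ofList y) "\t" = tabRow y := by
      rw [pvSplit_single _ _ '\t' rfl, String.toList_ofList]; rfl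
    rw [hcells, PySem.List.slice_to _ hC, pvPadCells_eq]
    have : (C - ((tabRow y).length : Int)).toNat = C.toNat - (tabRow y).length := by omega
    rw [this, take_append_replicate_eq]
  -- rows level
  rw [List.map_map, pvPadRows_eq, PySem.List.slice_to _ hR]
  have hA : ∀ y ∈ P0, ((fun line => PySem.List.slice (pvPadCells C (pvSplit line "\t")) none (some C)) ∘ String.ofList) y
      = (List.range C.toNat).map (fun i => (tabRow y).getD i "") := fun y _ => rowA y
  rw [List.map_congr_left hA]
  set P := P0.map tabRow with hP
  have hmap : P0.map (fun y => (List.range C.toNat).map (fun i => (tabRow y).getD i ""))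
      = P.map (fun cells => (List.range C.toNat).map (fun i => cells.getD i "")) := by
    rw [hP, List.map_map]; rfl
  rw [hmap]
  have hlen : (R - ((P.map (fun cells => (List.range C.toNat).map (fun i => cells.getD i ""))).length : Int)).toNat
      = R.toNat - P.length := by simp only [List.length_map]; omega
  have hgen := take_append_replicate_eq
    (P.map (fun cells => (List.range C.toNat).map (fun i => cells.getD i "")))
    (List.replicate C.toNat "") R.toNat
  rw [List.length_map] at hgen
  rw [hlen, hgen]
  -- pointwise over r
  rw [PySem.List.pyRange_one 0 R]
  have hR0 : (R - 0).toNat = R.toNat := by omega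
  rw [hR0]
  simp only [List.map_map]
  apply List.map_congr_left
  intro r hr
  rw [List.mem_range] at hr
  simp only [Function.comp_apply, zero_add]
  rw [PySem.List.pyRange_one 0 C]
  have hC0 : (C - 0).toNat = C.toNat := by omega
  rw [hC0]
  simp only [List.map_map]
  simp only [Function.comp_def, zero_add]
  have hPlen : P.length = P0.length := by simp [hP]
  by_cases h : r < P0.length
  · rw [List.getD_eq_getElem _ _ (by simp only [hP, List.length_map]; exact h)]
    simp only [List.getElem_map]
    apply List.map_congr_left
    intro c hc
    rw [List.mem_range] at hc
    rw [PySem.List.pyGetD_natCast, PySem.List.pyGetD_natCast]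
    have hrP : r < P.length := by rw [hPlen]; exact h
    have hPr : P.getD r [] = P[r] := List.getD_eq_getElem _ _ hrP
    rw [hPr]
    by_cases h2 : c < P[r].length
    · rw [if_pos ⟨by exact_mod_cast hrP, by exact_mod_cast h2⟩]
    · rw [if_neg (by push Not; intro _; exact_mod_cast Nat.not_lt.mp h2)]
      exact List.getD_eq_default _ _ (Nat.not_lt.mp h2)
  · rw [List.getD_eq_default _ _ (by simp only [hP, List.length_map]; exact Nat.not_lt.mp h)]
    have hcond : ¬ ((r : Int) < (P.length : Int)) := by
      rw [hPlen]; exact_mod_cast h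
    refine Eq.symm ((List.map_congr_left (g := fun _ => "") (fun k hk => ?_)).trans (by simp))
    rw [if_neg (by push Not; intro hh; exact absurd hh hcond)]
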